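-- pv_equiv track=rewrite | github.com/CodeAmalgamation/Perl_to_Python | python_helpers/helpers/database.py | _convert_placeholders_to_oracle
-- ===== SOURCE A (Python) =====
-- def _convert_placeholders_to_oracle(sql: str) -> str:
--     """Convert DBI-style ? placeholders to Oracle-style :1, :2, etc."""
--     counter = 1
--     result = []
--     i = 0
--     in_string = False
--     string_char = None
--
--     while i < len(sql):
--         char = sql[i]
--
--         # Track string literals to avoid replacing ? inside strings
--         if char in ("'", '"'):
--             if not in_string:
--                 in_string = True
--                 string_char = char
--             elif char == string_char:
--                 in_string = False
--                 string_char = None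
--
--         # Replace ? with :N outside of strings
--         if char == '?' and not in_string:
--             result.append(f':{counter}')
--             counter += 1
--         else:
--             result.append(char)
--
--         i += 1
--
--     return ''.join(result)
-- ===== SOURCE B (Python) =====
-- import re
--
-- _TOKEN = re.compile(r"'[^']*'?|\"[^\"]*\"?|\?")
--
-- def _convert_placeholders_to_oracle(sql: str) -> str:
--     """Convert DBI-style ? placeholders to Oracle-style :1, :2, etc."""
--     counter = 1
--
--     def repl(m):
--         nonlocal counter
--         tok = m.group(0)
--         if tok == '?':
--             tok = f':{counter}'
--             counter += 1
--         return tok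
--
--     return _TOKEN.sub(repl, sql)
-- ===== Notes on version B (the rewrite author's own statement) =====
-- stated objective: idiomatic
-- what changed: Replaced the manual char-by-char in_string/string_char state machine with a single re.sub over a token regex that matches a whole quoted literal (closing quote optional) or a bare '?', with the counter in a closure.
import Mathlib
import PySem

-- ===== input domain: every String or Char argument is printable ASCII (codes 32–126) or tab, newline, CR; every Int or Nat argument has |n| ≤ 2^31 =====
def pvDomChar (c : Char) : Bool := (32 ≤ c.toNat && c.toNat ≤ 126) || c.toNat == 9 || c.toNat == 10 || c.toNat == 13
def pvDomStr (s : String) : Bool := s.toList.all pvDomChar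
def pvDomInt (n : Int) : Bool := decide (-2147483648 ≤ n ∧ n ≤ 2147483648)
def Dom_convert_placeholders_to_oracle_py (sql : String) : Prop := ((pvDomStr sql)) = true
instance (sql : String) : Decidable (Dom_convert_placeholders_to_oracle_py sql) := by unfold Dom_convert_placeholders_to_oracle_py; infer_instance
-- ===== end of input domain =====

-- B replaces A's char-by-char in_string/string_char state machine by a regex-style
-- tokenizer that consumes a whole quoted literal (closing quote optional) or a bare '?'
-- per step (objective: idiomatic/alternative; not claimed faster).

-- ===== PORT A =====
-- A's while loop: state = (counter, in_string, string_char); one char per step.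
def pvLoopA : List Char → Int → Bool → Option Char → List Char
  | [], _, _, _ => []
  | c :: rest, counter, inStr, sc =>
    -- update in_string/string_char first, as A does
    let st : Bool × Option Char :=
      if c = '\'' ∨ c = '"' then
        if !inStr then (true, some c)
        else if some c = sc then (false, none)
        else (inStr, sc)
      else (inStr, sc)
    if c = '?' ∧ st.1 = false then
      (":" ++ PySem.Int.toStr counter).toList ++ pvLoopA rest (counter + 1) st.1 st.2
    else
      c :: pvLoopA rest counter st.1 st.2

def convert_placeholders_to_oracle_py (sql : String) : String :=
  String.ofList (pvLoopA sql.toList 1 false none)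

-- ===== PORT B =====
-- consume the body of a quoted literal up to and including the closing quote q
-- (or to end of input if unterminated): the token "'[^']*'?" / "\"[^\"]*\"?" minus its opener.
def pvTakeLit (q : Char) : List Char → List Char × List Char
  | [] => ([], [])
  | c :: rest =>
    if c = q then ([c], rest)
    else
      let p := pvTakeLit q rest
      (c :: p.1, p.2)

theorem pvTakeLit_len (q : Char) (l : List Char) : (pvTakeLit q l).2.length ≤ l.length := by
  induction l with
  | nil => simp [pvTakeLit]
  | cons c rest ih =>
    simp only [pvTakeLit]
    split
    · simp
    · simpa using Nat.le_succ_of_le ih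

-- B's tokenizer: one whole token (quoted literal, '?', or ordinary char) per step.
def pvLoopB : List Char → Int → List Char
  | [], _ => []
  | c :: rest, n =>
    if c = '\'' ∨ c = '"' then
      let p := pvTakeLit c rest
      c :: (p.1 ++ pvLoopB p.2 n)
    else if c = '?' then
      (":" ++ PySem.Int.toStr n).toList ++ pvLoopB rest (n + 1)
    else
      c :: pvLoopB rest n
  termination_by l _ => l.length
  decreasing_by
    · exact Nat.lt_succ_of_le (pvTakeLit_len c rest)
    · simp
    · simp

def convert_placeholders_to_oracle_py_alt (sql : String) : String :=
  String.ofList (pvLoopB sql.toList 1)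

-- ===== PRECONDITION & SPEC =====
def Spec_convert_placeholders_to_oracle_py (sql : String) (out : String) : Prop := out = convert_placeholders_to_oracle_py_alt sql
instance (sql : String) (out : String) : Decidable (Spec_convert_placeholders_to_oracle_py sql out) := by unfold Spec_convert_placeholders_to_oracle_py; infer_instance

-- ===== CLAIM (what is proved, stated in full; the proofs are below) =====
def Claim_equal_convert_placeholders_to_oracle_py : Prop := ∀ (sql : String), Dom_convert_placeholders_to_oracle_py sql → Spec_convert_placeholders_to_oracle_py sql (convert_placeholders_to_oracle_py sql)

-- ===== LEMMAS AND PROOFS =====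

-- While A is inside a q-quoted literal it copies every char verbatim until the
-- matching q (which closes the literal): exactly B's pvTakeLit span.
theorem pvLoopA_inStr (q : Char) (hq : q = '\'' ∨ q = '"') :
    ∀ (l : List Char) (counter : Int),
      pvLoopA l counter true (some q) =
        (pvTakeLit q l).1 ++ pvLoopA (pvTakeLit q l).2 counter false none := by
  intro l
  induction l with
  | nil => intro counter; simp [pvLoopA, pvTakeLit]
  | cons c rest ih =>
    intro counter
    by_cases hc : c = q
    · subst hc
      have hne : c ≠ '?' := by rcases hq with h | h <;> simp [h]
      simp [pvLoopA, pvTakeLit, hq, hne]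
    · simp only [pvLoopA, pvTakeLit, hc]
      by_cases hcq : c = '\'' ∨ c = '"'
      · have hne : ¬ (some c = some q) := by simpa using hc
        simp [hcq, hne, ih]
      · have : ¬ (c = '?' ∧ true = false) := by simp
        simp [hcq, ih]

theorem pvLoop_eq : ∀ (n : Nat) (l : List Char), l.length ≤ n →
    ∀ (counter : Int), pvLoopA l counter false none = pvLoopB l counter := by
  intro n
  induction n with
  | zero =>
    intro l hl counter
    have : l = [] := List.eq_nil_of_length_eq_zero (Nat.le_zero.mp hl)
    simp [this, pvLoopA, pvLoopB]
  | succ n ih =>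
    intro l hl counter
    match l with
    | [] => simp [pvLoopA, pvLoopB]
    | c :: rest =>
      have hrest : rest.length ≤ n := by simpa using Nat.lt_succ_iff.mp (Nat.lt_of_lt_of_le (by simp) hl)
      by_cases hq : c = '\'' ∨ c = '"'
      · have hA : pvLoopA (c :: rest) counter false none = c :: pvLoopA rest counter true (some c) := by
          simp [pvLoopA, hq]
        have hB : pvLoopB (c :: rest) counter = c :: ((pvTakeLit c rest).1 ++ pvLoopB (pvTakeLit c rest).2 counter) := by
          simp [pvLoopB, hq]
        rw [hA, hB, pvLoopA_inStr c hq rest counter,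
          ih _ (le_trans (pvTakeLit_len c rest) hrest)]
      · simp only [pvLoopA, pvLoopB, hq]
        by_cases hc : c = '?'
        · simp [hc, ih rest hrest]
        · simp [hc, ih rest hrest]

-- ===== VERDICT (by name: the statement is the Claim_ definition above) =====
theorem convert_placeholders_to_oracle_py_spec : Claim_equal_convert_placeholders_to_oracle_py := by
  intro sql _
  unfold Spec_convert_placeholders_to_oracle_py convert_placeholders_to_oracle_py convert_placeholders_to_oracle_py_alt
  rw [pvLoop_eq sql.toList.length sql.toList le_rfl]
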